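-- pv_equiv track=rewrite | github.com/pypi-data/pypi-mirror-199 | packages/kabbes-dir-ops/kabbes_dir_ops-0.10.0.tar.gz/kabbes_dir_ops-0.10.0/src/dir_ops/utils.py | remove_prefix_from_paths
-- ===== SOURCE A (Python) =====
-- from typing import List, Any, Tuple
--
-- DELIM = '/'
--
-- def path_to_dirs( path: str ) -> List[str]:
--
--     """splits a path into directories"""
--     if path == '':
--         return []
--     return path.split( DELIM )
--
-- def join( *items: str ) -> str:
--
--     """joins a list of dirs into a path"""
--     return DELIM.join( items )
--
-- def remove_prefix_from_paths( prefix_path, full_paths ):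
--
--     """Removes prefix from full paths"""
--
--     number_of_dirs = len( path_to_dirs(prefix_path) )
--
--     relative_paths = []
--     for full_path in full_paths:
--
--         folder_list = path_to_dirs( full_path )
--         relative_list = folder_list[ number_of_dirs : ]
--
--         relative_paths.append( join(*relative_list) )
--
--     return relative_paths
-- ===== SOURCE B (Python) =====
-- def remove_prefix_from_paths(prefix_path, full_paths):
--     """Removes prefix from full paths (delimiter-scan version: no split/join)."""
--     number_of_dirs = 0 if prefix_path == '' else prefix_path.count('/') + 1
--
--     def tail_after(p):
--         k = number_of_dirs
--         i = 0
--         n = len(p)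
--         while k > 0 and i < n:
--             if p[i] == '/':
--                 k -= 1
--             i += 1
--         return p[i:] if k == 0 else ''
--
--     return [tail_after(p) for p in full_paths]
-- ===== Notes on version B (the rewrite author's own statement) =====
-- stated objective: alternative
-- what changed: Instead of splitting each path into a list of directories, slicing it and rejoining with '/', B counts the prefix's delimiters once and for each path scans directly past that many '/' characters, returning the remaining substring (or '' if the path has too few delimiters).
import Mathlib
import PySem

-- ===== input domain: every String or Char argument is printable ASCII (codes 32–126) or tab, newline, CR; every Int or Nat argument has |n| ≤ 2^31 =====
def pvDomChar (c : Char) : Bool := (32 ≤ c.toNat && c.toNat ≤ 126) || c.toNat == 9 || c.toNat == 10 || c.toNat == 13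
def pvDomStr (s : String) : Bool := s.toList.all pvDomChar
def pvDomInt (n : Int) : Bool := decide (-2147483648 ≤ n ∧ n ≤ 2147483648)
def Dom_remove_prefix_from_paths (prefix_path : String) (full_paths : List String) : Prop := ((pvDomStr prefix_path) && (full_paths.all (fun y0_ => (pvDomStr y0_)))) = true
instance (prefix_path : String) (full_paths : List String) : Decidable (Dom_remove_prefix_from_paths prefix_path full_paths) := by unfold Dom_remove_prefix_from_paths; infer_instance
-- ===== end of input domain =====

-- B replaces A's split/slice/join per path by a direct scan past the first `number_of_dirs` '/' delimiters (alternative decomposition; return value only, A mutates nothing).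


-- ===== PORT A =====
-- path_to_dirs: '' -> [], else path.split('/')  (sep "/" is nonempty, so split? is always `some`; the `none` arm is a totality guard only)
def path_to_dirs (path : String) : List String :=
  if path = "" then []
  else match PySem.Str.split? path "/" with
       | some l => l
       | none => []

-- join(*items) = DELIM.join(items)
def pv_join (items : List String) : String := PySem.Str.join "/" items

def remove_prefix_from_paths (prefix_path : String) (full_paths : List String) : List String :=
  let number_of_dirs := (path_to_dirs prefix_path).length
  full_paths.foldl
    (fun relative_paths full_path =>
      let folder_list := path_to_dirs full_path
      let relative_list := PySem.List.slice folder_list (some (number_of_dirs : Int)) none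
      relative_paths ++ [pv_join relative_list])
    []

-- ===== PORT B =====
-- Source B's tail_after while-loop: the Nat is k (slashes still to pass), the list is p[i:];
-- `none` is the `k > 0` exit (return ''), `some t` the `k == 0` exit (return p[i:]).
def pvScanTail : Nat → List Char → Option (List Char)
  | 0, cs => some cs
  | _ + 1, [] => none
  | k + 1, c :: cs => pvScanTail (if c = '/' then k else k + 1) cs

def remove_prefix_from_paths_alt (prefix_path : String) (full_paths : List String) : List String :=
  let number_of_dirs := if prefix_path = "" then 0 else PySem.Str.count prefix_path "/" + 1
  full_paths.map (fun p =>
    match pvScanTail number_of_dirs p.toList with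
    | some t => String.ofList t
    | none => "")

-- ===== PRECONDITION & SPEC =====
def Spec_remove_prefix_from_paths (prefix_path : String) (full_paths : List String) (out : List String) : Prop := out = remove_prefix_from_paths_alt prefix_path full_paths
instance (prefix_path : String) (full_paths : List String) (out : List String) : Decidable (Spec_remove_prefix_from_paths prefix_path full_paths out) := by unfold Spec_remove_prefix_from_paths; infer_instance

-- ===== CLAIM (what is proved, stated in full; the proofs are below) =====
def Claim_equal_remove_prefix_from_paths : Prop := ∀ (prefix_path : String) (full_paths : List String), Dom_remove_prefix_from_paths prefix_path full_paths → Spec_remove_prefix_from_paths prefix_path full_paths (remove_prefix_from_paths prefix_path full_paths)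

-- ===== LEMMAS AND PROOFS =====

-- reference splitter: Python's cs.split('/') with an accumulator for the current (reversed) piece
def pvSplitAux : List Char → List Char → List (List Char)
  | [], cur => [cur.reverse]
  | c :: rest, cur => if c = '/' then cur.reverse :: pvSplitAux rest [] else pvSplitAux rest (c :: cur)

lemma pvSplitAux_ne_nil (l cur : List Char) : pvSplitAux l cur ≠ [] := by
  cases l with
  | nil => simp [pvSplitAux]
  | cons c rest => by_cases h : c = '/' <;> simp [pvSplitAux, h] <;> exact pvSplitAux_ne_nil rest (c :: cur)

lemma splitOn_go_eq (l : List Char) : ∀ (fuel : Nat) (cur : List Char) (acc : List (List Char)),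
    l.length ≤ fuel →
    PySem.Chars.splitOn.go ['/'] fuel l cur acc = acc.reverse ++ pvSplitAux l cur := by
  induction l with
  | nil =>
    intro fuel cur acc _
    cases fuel <;> simp [PySem.Chars.splitOn.go, pvSplitAux]
  | cons c rest ih =>
    intro fuel cur acc hle
    cases fuel with
    | zero => simp at hle
    | succ f =>
      simp only [PySem.Chars.splitOn.go]
      by_cases h : c = '/'
      · simp only [h, List.isPrefixOf, BEq.rfl, Bool.true_and, if_pos, List.length_cons,
          List.drop_succ_cons, List.length_nil, List.drop_zero]
        rw [ih f [] (cur.reverse :: acc) (by simpa using Nat.le_of_succ_le_succ hle)]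
        simp [pvSplitAux]
      · have hpre : List.isPrefixOf ['/'] (c :: rest) = false := by
          simp [List.isPrefixOf, BEq.comm]
          exact h
        rw [hpre]
        simp only [Bool.false_eq_true, if_false]
        rw [ih f (c :: cur) acc (by simpa using Nat.le_of_succ_le_succ hle)]
        simp [pvSplitAux, h]

lemma splitOn_eq (cs : List Char) : PySem.Chars.splitOn cs ['/'] = pvSplitAux cs [] := by
  simpa using splitOn_go_eq cs (cs.length + 1) [] [] (Nat.le_succ _)

lemma count_go_eq (l : List Char) : ∀ (fuel : Nat) (acc : Nat),
    l.length ≤ fuel →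
    PySem.Chars.count.go ['/'] fuel l acc = acc + l.countP (fun c => c == '/') := by
  induction l with
  | nil => intro fuel acc _; cases fuel <;> simp [PySem.Chars.count.go]
  | cons c rest ih =>
    intro fuel acc hle
    cases fuel with
    | zero => simp at hle
    | succ f =>
      simp only [PySem.Chars.count.go]
      by_cases h : c = '/'
      · simp only [h, List.isPrefixOf, BEq.rfl, Bool.true_and, if_pos, List.length_cons,
          List.drop_succ_cons, List.length_nil, List.drop_zero]
        rw [ih f (acc + 1) (by simpa using Nat.le_of_succ_le_succ hle)]
        simp
        omega
      · have hpre : List.isPrefixOf ['/'] (c :: rest) = false := by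
          simp [List.isPrefixOf, BEq.comm]; exact h
        rw [hpre]
        simp only [Bool.false_eq_true, if_false]
        rw [ih f acc (by simpa using Nat.le_of_succ_le_succ hle)]
        simp [h]

lemma count_eq_countP (cs : List Char) :
    PySem.Chars.count cs ['/'] = cs.countP (fun c => c == '/') := by
  simp [PySem.Chars.count, count_go_eq cs cs.length 0 le_rfl]

lemma length_pvSplitAux (l : List Char) : ∀ cur, (pvSplitAux l cur).length = l.countP (fun c => c == '/') + 1 := by
  induction l with
  | nil => intro cur; simp [pvSplitAux]
  | cons c rest ih =>
    intro cur
    by_cases h : c = '/' <;> simp [pvSplitAux, h, ih]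

lemma key0 (l : List Char) : ∀ cur, List.intercalate ['/'] (pvSplitAux l cur) = cur.reverse ++ l := by
  induction l with
  | nil => intro cur; simp [pvSplitAux, List.intercalate]
  | cons c rest ih =>
    intro cur
    by_cases h : c = '/'
    · simp only [pvSplitAux, h, if_pos]
      obtain ⟨p, ps, hps⟩ := List.exists_cons_of_ne_nil (pvSplitAux_ne_nil rest [])
      have := ih []
      rw [hps] at this ⊢
      simp [List.intercalate] at this ⊢
      simp [this]
    · simp only [pvSplitAux, h, if_false]
      rw [ih (c :: cur)]
      simp

lemma keyS (l : List Char) : ∀ (k : Nat) (cur : List Char),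
    List.intercalate ['/'] (List.drop (k + 1) (pvSplitAux l cur)) =
      (match pvScanTail (k + 1) l with | some t => t | none => []) := by
  induction l with
  | nil => intro k cur; simp [pvSplitAux, pvScanTail, List.intercalate]
  | cons c rest ih =>
    intro k cur
    by_cases h : c = '/'
    · simp only [pvSplitAux, h, if_pos, List.drop_succ_cons, pvScanTail]
      cases k with
      | zero => simpa [pvScanTail] using key0 rest []
      | succ j => exact ih j []
    · simp only [pvSplitAux, h, if_false, pvScanTail]
      exact ih k (c :: cur)

lemma numdirs_eq (pre : String) :
    (path_to_dirs pre).length = (if pre = "" then 0 else PySem.Str.count pre "/" + 1) := by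
  unfold path_to_dirs
  by_cases h : pre = ""
  · simp [h]
  · simp only [h, if_false, PySem.Str.split?, PySem.Chars.split?]
    have hsep : ("/" : String).toList = ['/'] := by decide
    simp [hsep, splitOn_eq, length_pvSplitAux, PySem.Str.count_eq, count_eq_countP]

lemma elem_eq (n : Nat) (p : String) :
    pv_join (PySem.List.slice (path_to_dirs p) (some (n : Int)) none) =
      (match pvScanTail n p.toList with | some t => String.ofList t | none => "") := by
  have hinj : ∀ a b : String, a.toList = b.toList → a = b := fun a b h => by
    have := congrArg String.ofList h
    simpa using this
  unfold path_to_dirs pv_join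
  by_cases hp : p = ""
  · subst hp
    rw [if_pos rfl, PySem.List.slice_from _ (by positivity : (0:Int) ≤ (n : Int))]
    cases n <;> simp [pvScanTail] <;> decide
  · have hsep : ("/" : String).toList = ['/'] := by decide
    simp only [hp, if_false, PySem.Str.split?, PySem.Chars.split?, hsep, List.isEmpty_cons,
      Bool.false_eq_true, if_false, Option.map_some, splitOn_eq, PySem.List.slice_from_natCast]
    apply hinj
    rw [PySem.Str.toList_join, ← List.map_drop, List.map_map]
    have hid : String.toList ∘ String.ofList = id := by
      funext l; simp
    rw [hid, List.map_id, hsep]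
    show List.intercalate ['/'] (List.drop n (pvSplitAux p.toList [])) = _
    cases n with
    | zero => simpa [pvScanTail] using key0 p.toList []
    | succ k =>
      rw [keyS]
      cases h : pvScanTail (k + 1) p.toList <;> simp

-- ===== VERDICT (by name: the statement is the Claim_ definition above) =====
theorem remove_prefix_from_paths_spec : Claim_equal_remove_prefix_from_paths := by
  intro pre fps _
  unfold Spec_remove_prefix_from_paths remove_prefix_from_paths remove_prefix_from_paths_alt
  rw [PySem.List.foldl_append_singleton_eq_map]
  refine List.map_congr_left fun p _ => ?_
  rw [numdirs_eq]
  exact elem_eq _ p
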